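-- pv_equiv track=rewrite | github.com/adrivrie/COMSOC-multi-winner-SAT | helperfunctions.py | strictlySupersetDominates
-- ===== SOURCE A (Python) =====
-- def intersection(committee, ballot):
--     result = []
--
--     for c,v in zip(committee, ballot):
--         if c and v:
--             result.append(1)
--         else:
--             result.append(0)
--     return tuple(result)
--
-- def strictlySupersetDominates(profile, committee1, committee2):
--     """
--     Returns true if committee1 strictly dominates committee2 in the sense
--     of weak Pareto
--     """
--     strict = False
--     for voter, ballot in enumerate(profile):
--         int1 = intersection(ballot, committee1)
--         int2 = intersection(ballot, committee2)
--         for i1, i2 in zip(int1, int2):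
--             if i2 > i1:
--                 return False
--             if i1 > i2:
--                 strict = True
--     return strict
-- ===== SOURCE B (Python) =====
-- def strictlySupersetDominates(profile, committee1, committee2):
--     """
--     Returns true if committee1 strictly dominates committee2 in the sense
--     of weak Pareto
--     """
--     m = min(len(committee1), len(committee2))
--     diffA = [i for i in range(m) if committee1[i] and not committee2[i]]
--     diffB = [i for i in range(m) if committee2[i] and not committee1[i]]
--     strict = False
--     for ballot in profile:
--         if any(i < len(ballot) and ballot[i] for i in diffB):
--             return False
--         if not strict and any(i < len(ballot) and ballot[i] for i in diffA):
--             strict = True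
--     return strict
-- ===== Notes on version B (the rewrite author's own statement) =====
-- stated objective: alternative
-- what changed: B precomputes the two sets of positions where the committees differ once, then per voter only tests those indices, instead of rebuilding and scanning full intersection tuples for every voter.
import Mathlib
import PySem

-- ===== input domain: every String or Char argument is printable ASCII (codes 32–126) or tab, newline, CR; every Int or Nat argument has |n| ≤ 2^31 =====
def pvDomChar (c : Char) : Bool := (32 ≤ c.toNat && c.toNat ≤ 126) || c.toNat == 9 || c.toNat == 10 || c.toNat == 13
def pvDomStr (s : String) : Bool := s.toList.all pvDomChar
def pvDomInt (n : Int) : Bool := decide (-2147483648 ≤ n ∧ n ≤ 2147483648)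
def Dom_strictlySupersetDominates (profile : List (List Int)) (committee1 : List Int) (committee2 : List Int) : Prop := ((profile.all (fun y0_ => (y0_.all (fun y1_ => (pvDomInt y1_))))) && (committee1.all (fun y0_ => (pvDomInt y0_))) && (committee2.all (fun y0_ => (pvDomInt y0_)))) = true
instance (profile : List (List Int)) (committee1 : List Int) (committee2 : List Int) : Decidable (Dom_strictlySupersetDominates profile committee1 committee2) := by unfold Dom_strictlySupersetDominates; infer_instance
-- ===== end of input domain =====

-- B precomputes the positions where the committees differ once and per voter tests only those
-- indices, instead of rebuilding and scanning full intersection tuples per voter (objective: alternative).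

-- ===== PORT A =====
-- intersection(committee, ballot): 1 where both entries are truthy, over the zip
def pvInter (committee ballot : List Int) : List Int :=
  (committee.zip ballot).map (fun p => if p.1 ≠ 0 ∧ p.2 ≠ 0 then (1 : Int) else 0)

-- the inner 'for i1, i2 in zip(int1, int2)' loop: none = 'return False', some s = updated strict
def pvInnerA : List (Int × Int) → Bool → Option Bool
  | [], strict => some strict
  | p :: rest, strict =>
    if p.1 < p.2 then none
    else pvInnerA rest (if p.2 < p.1 then true else strict)

-- the outer loop over the profile
def pvOuterA (c1 c2 : List Int) : List (List Int) → Bool → Bool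
  | [], strict => strict
  | ballot :: rest, strict =>
    match pvInnerA ((pvInter ballot c1).zip (pvInter ballot c2)) strict with
    | none => false
    | some s => pvOuterA c1 c2 rest s

def strictlySupersetDominates (profile : List (List Int)) (committee1 : List Int) (committee2 : List Int) : Bool :=
  pvOuterA committee1 committee2 profile false

-- ===== PORT B =====
-- [i for i in range(m) if yes[i] and not no[i]]
def pvDiffIdx (m : Nat) (yes no : List Int) : List Nat :=
  (List.range m).filter (fun i => (yes.getD i 0 != 0) && (no.getD i 0 == 0))

-- any(i < len(ballot) and ballot[i] for i in idxs)
def pvApproves (ballot : List Int) (idxs : List Nat) : Bool :=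
  idxs.any (fun i => decide (i < ballot.length) && (ballot.getD i 0 != 0))

-- the voter loop of Source B
def pvLoopB (diffA diffB : List Nat) : List (List Int) → Bool → Bool
  | [], strict => strict
  | ballot :: rest, strict =>
    if pvApproves ballot diffB then false
    else pvLoopB diffA diffB rest (if !strict && pvApproves ballot diffA then true else strict)

def strictlySupersetDominates_alt (profile : List (List Int)) (committee1 : List Int) (committee2 : List Int) : Bool :=
  let m := min committee1.length committee2.length
  pvLoopB (pvDiffIdx m committee1 committee2) (pvDiffIdx m committee2 committee1) profile false

-- ===== PRECONDITION & SPEC =====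
def Spec_strictlySupersetDominates (profile : List (List Int)) (committee1 : List Int) (committee2 : List Int) (out : Bool) : Prop := out = strictlySupersetDominates_alt profile committee1 committee2
instance (profile : List (List Int)) (committee1 : List Int) (committee2 : List Int) (out : Bool) : Decidable (Spec_strictlySupersetDominates profile committee1 committee2 out) := by unfold Spec_strictlySupersetDominates; infer_instance

-- ===== CLAIM (what is proved, stated in full; the proofs are below) =====
def Claim_equal_strictlySupersetDominates : Prop := ∀ (profile : List (List Int)) (committee1 : List Int) (committee2 : List Int), Dom_strictlySupersetDominates profile committee1 committee2 → Spec_strictlySupersetDominates profile committee1 committee2 (strictlySupersetDominates profile committee1 committee2)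

-- ===== LEMMAS AND PROOFS =====

lemma innerA_char (ps : List (Int × Int)) (strict : Bool) :
    pvInnerA ps strict =
      if ps.any (fun p => decide (p.1 < p.2)) then none
      else some (strict || ps.any (fun p => decide (p.2 < p.1))) := by
  induction ps generalizing strict with
  | nil => simp [pvInnerA]
  | cons p t ih =>
    by_cases h : p.1 < p.2
    · simp [pvInnerA, h]
    · by_cases h2 : p.2 < p.1
      · simp only [pvInnerA, if_neg h, if_pos h2]
        rw [ih, List.any_cons, List.any_cons, decide_eq_false h, decide_eq_true h2,
          Bool.false_or, Bool.true_or, Bool.or_true]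
      · simp only [pvInnerA, if_neg h, if_neg h2]
        rw [ih, List.any_cons, List.any_cons, decide_eq_false h, decide_eq_false h2,
          Bool.false_or, Bool.false_or]

lemma head_lt (hb hx hy : Int) :
    ((if hb ≠ 0 ∧ hx ≠ 0 then (1 : Int) else 0) < (if hb ≠ 0 ∧ hy ≠ 0 then (1 : Int) else 0))
      ↔ (hb ≠ 0 ∧ hy ≠ 0 ∧ hx = 0) := by
  by_cases hb0 : hb = 0 <;> by_cases hx0 : hx = 0 <;> by_cases hy0 : hy = 0 <;>
    simp [hb0, hx0, hy0]

lemma lhs_iff (b x y : List Int) :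
    (((pvInter b x).zip (pvInter b y)).any (fun p => decide (p.1 < p.2)) = true)
      ↔ ∃ i, i < b.length ∧ i < x.length ∧ i < y.length ∧
          b.getD i 0 ≠ 0 ∧ y.getD i 0 ≠ 0 ∧ x.getD i 0 = 0 := by
  induction b generalizing x y with
  | nil => simp [pvInter]
  | cons hb tb ih =>
    cases x with
    | nil => simp [pvInter]
    | cons hx tx =>
      cases y with
      | nil => simp [pvInter]
      | cons hy ty =>
        simp only [pvInter, List.zip_cons_cons, List.map_cons, List.any_cons,
          Bool.or_eq_true, decide_eq_true_eq, List.length_cons]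
        constructor
        · rintro (h | h)
          · exact ⟨0, by simpa using (head_lt hb hx hy).mp h⟩
          · obtain ⟨i, h1, h2, h3, h4, h5, h6⟩ := (ih tx ty).mp h
            exact ⟨i + 1, by simpa using ⟨h1, h2, h3, h4, h5, h6⟩⟩
        · rintro ⟨i, h1, h2, h3, h4, h5, h6⟩
          cases i with
          | zero =>
            left
            exact (head_lt hb hx hy).mpr (by simpa using And.intro h4 (And.intro h5 h6))
          | succ j =>
            right
            exact (ih tx ty).mpr ⟨j, by omega, by omega, by omega,
              by simpa using h4, by simpa using h5, by simpa using h6⟩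

lemma pairs_eq (b x y : List Int) :
    ((pvInter b x).zip (pvInter b y)).any (fun p => decide (p.1 < p.2))
      = pvApproves b (pvDiffIdx (min x.length y.length) y x) := by
  rw [Bool.eq_iff_iff, lhs_iff]
  simp only [pvApproves, pvDiffIdx, List.any_eq_true, List.mem_filter, List.mem_range,
    Bool.and_eq_true, decide_eq_true_eq, bne_iff_ne, beq_iff_eq]
  constructor
  · rintro ⟨i, h1, h2, h3, h4, h5, h6⟩
    exact ⟨i, ⟨by omega, h5, h6⟩, h1, h4⟩
  · rintro ⟨i, ⟨him, h5, h6⟩, h1, h4⟩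
    exact ⟨i, h1, by omega, by omega, h4, h5, h6⟩

lemma zip_any_swap (l1 l2 : List Int) :
    (l1.zip l2).any (fun p => decide (p.2 < p.1))
      = (l2.zip l1).any (fun p => decide (p.1 < p.2)) := by
  induction l1 generalizing l2 with
  | nil => cases l2 <;> simp
  | cons a t ih => cases l2 <;> simp [ih]

lemma step (b c1 c2 : List Int) (strict : Bool) :
    pvInnerA ((pvInter b c1).zip (pvInter b c2)) strict =
      if pvApproves b (pvDiffIdx (min c1.length c2.length) c2 c1) then none
      else some (strict || pvApproves b (pvDiffIdx (min c1.length c2.length) c1 c2)) := by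
  rw [innerA_char, pairs_eq, zip_any_swap, pairs_eq, Nat.min_comm c2.length c1.length]

lemma loop_eq (c1 c2 : List Int) (profile : List (List Int)) (strict : Bool) :
    pvOuterA c1 c2 profile strict =
      pvLoopB (pvDiffIdx (min c1.length c2.length) c1 c2)
        (pvDiffIdx (min c1.length c2.length) c2 c1) profile strict := by
  induction profile generalizing strict with
  | nil => rfl
  | cons b rest ih =>
    by_cases h : pvApproves b (pvDiffIdx (min c1.length c2.length) c2 c1) = true
    · simp [pvOuterA, pvLoopB, step, h]
    · simp only [Bool.not_eq_true] at h
      simp only [pvOuterA, step, h, if_false, pvLoopB, Bool.false_eq_true]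
      rw [ih]
      congr 1
      cases strict <;> simp

-- ===== VERDICT (by name: the statement is the Claim_ definition above) =====
theorem strictlySupersetDominates_spec : Claim_equal_strictlySupersetDominates := by
  intro profile c1 c2 _
  unfold Spec_strictlySupersetDominates strictlySupersetDominates strictlySupersetDominates_alt
  exact loop_eq c1 c2 profile false
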